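-- pv_equiv track=rewrite | github.com/WeizhongLiang/AndroidBoyPublic | src/Common/StringUtility.py | splitBySpace
-- ===== SOURCE A (Python) =====
-- import string
--
-- def splitBySpace(text, delete="") -> [string]:
--     """Returns text with multiple whitespace reduced to single spaces
--     Any characters in delete are excluded from the resultant string.
--     """
--     result = []
--     word = []
--     for char in text:
--         if char in delete:
--             continue
--         elif char.isspace():
--             if word:
--                 result.append("".join(word))
--                 word = []
--         else:
--             word.append(char)
--     if word:
--         result.append("".join(word))
--     return result
-- ===== SOURCE B (Python) =====
-- def splitBySpace(text, delete=""):
--     """Strip deletion chars in one pass, then let str.split() do the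
--     whitespace splitting (it collapses runs and drops empty tokens)."""
--     cleaned = "".join(c for c in text if c not in delete)
--     return cleaned.split()
-- ===== Notes on version B (the rewrite author's own statement) =====
-- stated objective: simpler
-- what changed: Replaced the manual word-accumulator/whitespace-merge loop with a filter pass followed by str.split(), which already collapses whitespace runs and drops empty tokens.
import Mathlib
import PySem

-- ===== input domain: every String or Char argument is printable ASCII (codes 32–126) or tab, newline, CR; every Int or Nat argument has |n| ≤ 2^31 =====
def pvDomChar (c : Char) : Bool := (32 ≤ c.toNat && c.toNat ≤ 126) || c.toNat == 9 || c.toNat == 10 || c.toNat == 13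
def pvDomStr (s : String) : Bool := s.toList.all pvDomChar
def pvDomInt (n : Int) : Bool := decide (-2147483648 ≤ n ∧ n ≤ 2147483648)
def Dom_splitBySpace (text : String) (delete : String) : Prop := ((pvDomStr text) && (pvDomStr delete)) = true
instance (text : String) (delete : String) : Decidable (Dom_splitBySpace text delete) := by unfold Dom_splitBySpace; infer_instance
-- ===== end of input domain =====

-- B replaces A's manual word-accumulator loop by a delete-filter pass followed by str.split() (objective: simpler).

-- ===== PORT A =====
-- the for-loop over text: state = (result, word), branches in A's order
def pvALoop (dl : List Char) : List Char → List String → List Char → List String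
  | [], result, word =>
      if word.isEmpty then result else result ++ [String.ofList word]
  | c :: rest, result, word =>
      if PySem.Chars.isIn [c] dl then pvALoop dl rest result word
      else if PySem.Chars.isspace c then
        if word.isEmpty then pvALoop dl rest result word
        else pvALoop dl rest (result ++ [String.ofList word]) []
      else pvALoop dl rest result (word ++ [c])

def splitBySpace (text : String) (delete : String) : List String :=
  pvALoop delete.toList text.toList [] []

-- ===== PORT B =====
def splitBySpace_alt (text : String) (delete : String) : List String :=
  PySem.Str.split₀
    (String.ofList (text.toList.filter (fun c => !PySem.Chars.isIn [c] delete.toList)))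

-- ===== PRECONDITION & SPEC =====
def Spec_splitBySpace (text : String) (delete : String) (out : List String) : Prop := out = splitBySpace_alt text delete
instance (text : String) (delete : String) (out : List String) : Decidable (Spec_splitBySpace text delete out) := by unfold Spec_splitBySpace; infer_instance

-- ===== CLAIM (what is proved, stated in full; the proofs are below) =====
def Claim_equal_splitBySpace : Prop := ∀ (text : String) (delete : String), Dom_splitBySpace text delete → Spec_splitBySpace text delete (splitBySpace text delete)

-- ===== LEMMAS AND PROOFS =====

-- A's loop on cs equals split₀'s accumulator loop on the delete-filtered cs,
-- with word/result tracked in reversed form on the split₀ side.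
theorem pvALoop_eq_go (dl : List Char) (cs : List Char) :
    ∀ (result : List String) (word : List Char),
      pvALoop dl cs result word =
        (PySem.Chars.split₀.go (cs.filter (fun c => !PySem.Chars.isIn [c] dl))
            word.reverse ((result.map String.toList).reverse)).map String.ofList := by
  induction cs with
  | nil =>
      intro result word
      simp only [pvALoop, List.filter_nil, PySem.Chars.split₀.go]
      by_cases h : word.isEmpty
      · simp [List.isEmpty_iff.mp h, Function.comp_def]
      · have : word.reverse.isEmpty = false := by
          simp [List.isEmpty_eq_false_iff] at h ⊢; exact h
        simp [h, this, Function.comp_def]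
  | cons c rest ih =>
      intro result word
      by_cases hdel : PySem.Chars.isIn [c] dl
      · simp [pvALoop, hdel, ih]
      · by_cases hsp : PySem.Chars.isspace c
        · by_cases hw : word.isEmpty
          · have : word = [] := List.isEmpty_iff.mp hw
            simp [pvALoop, hdel, hsp, this, ih, PySem.Chars.split₀.go]
          · have hwr : word.reverse.isEmpty = false := by
              simp [List.isEmpty_eq_false_iff] at hw ⊢; exact hw
            simp [pvALoop, hdel, hsp, hw, ih, PySem.Chars.split₀.go, hwr]
        · simp [pvALoop, hdel, hsp, ih, PySem.Chars.split₀.go]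

-- ===== VERDICT (by name: the statement is the Claim_ definition above) =====
theorem splitBySpace_spec : Claim_equal_splitBySpace := by
  intro text delete _
  unfold Spec_splitBySpace splitBySpace splitBySpace_alt
  rw [pvALoop_eq_go]
  simp [PySem.Str.split₀, PySem.Chars.split₀]
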